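-- pv_equiv track=rewrite | github.com/Desmeister/projecteuler | pandig.py | equalDigits
-- ===== SOURCE A (Python) =====
-- def equalDigits(n1, n2):
--      """
--      Checks if numbers n1 and n2 have the same digits, a.k.a are anagrams
--      """
--
--      d1 = [int(d) for d in str(n1)]
--      d2 = [int(d) for d in str(n2)]
--      if(len(d1)!=len(d2)):
--           return False
--      length = len(d1)
--      count1 = [0]*10
--      count2 = [0]*10
--      for i in range(length):
--           count1[d1[i]] += 1
--           count2[d2[i]] += 1
--      for i in range(10):
--           if(count1[i]!=count2[i]):
--                return False
--      return True
-- ===== SOURCE B (Python) =====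
-- def equalDigits(n1, n2):
--     """
--     Checks if numbers n1 and n2 have the same digits, a.k.a are anagrams
--     """
--     d1 = [int(d) for d in str(n1)]
--     d2 = [int(d) for d in str(n2)]
--     return sorted(d1) == sorted(d2)
-- ===== Notes on version B (the rewrite author's own statement) =====
-- stated objective: simpler
-- what changed: Replaced the length check plus the two 10-bucket counting arrays and their comparison loop by a single sort-then-compare of the two digit lists (sorted(d1) == sorted(d2)); the shared int()-per-character front-end is kept so negative inputs still raise ValueError.
import Mathlib
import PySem

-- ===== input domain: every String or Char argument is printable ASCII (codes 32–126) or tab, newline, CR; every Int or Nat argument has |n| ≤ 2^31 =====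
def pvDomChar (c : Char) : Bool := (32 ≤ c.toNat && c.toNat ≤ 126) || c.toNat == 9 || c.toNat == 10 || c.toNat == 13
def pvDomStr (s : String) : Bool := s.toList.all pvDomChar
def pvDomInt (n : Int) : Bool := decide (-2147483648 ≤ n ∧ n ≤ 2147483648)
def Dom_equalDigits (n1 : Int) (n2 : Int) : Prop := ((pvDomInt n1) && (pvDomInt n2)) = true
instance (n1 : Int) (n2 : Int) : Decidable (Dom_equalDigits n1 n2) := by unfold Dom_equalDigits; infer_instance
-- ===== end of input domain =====

-- B replaces A's two 10-bucket count arrays (and the length pre-check) by a single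
-- sort-then-compare of the two digit lists; return value only, no side effects.

-- ===== PORT A =====
-- int(d) for one character d of str(n): exact via PySem.Int.ofChars?; the .getD 0 default is
-- never reached under Pre_ (str of a nonnegative int consists of digit characters only).
def pvDigitVal (c : Char) : Int := (PySem.Int.ofChars? [c]).getD 0
-- [int(d) for d in str(n)]
def pvDigits (n : Int) : List Int := (PySem.Int.toChars n).map pvDigitVal
-- count[d] += 1 ; .toNat is exact here since 0 ≤ d < 10 under Pre_
def pvBump (cnt : List Int) (d : Int) : List Int := cnt.set d.toNat (cnt.getD d.toNat 0 + 1)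

def equalDigits (n1 : Int) (n2 : Int) : Bool :=
  let d1 := pvDigits n1
  let d2 := pvDigits n2
  if d1.length ≠ d2.length then false
  else
    let length := d1.length
    -- for i in range(length): count1[d1[i]] += 1 ; count2[d2[i]] += 1
    let counts := (PySem.List.pyRange 0 (length : Int) 1).foldl
      (fun (s : List Int × List Int) i =>
        (pvBump s.1 (PySem.List.pyGetD d1 i 0), pvBump s.2 (PySem.List.pyGetD d2 i 0)))
      (List.replicate 10 (0 : Int), List.replicate 10 (0 : Int))
    -- for i in range(10): if count1[i] != count2[i]: return False ; return True
    (PySem.List.pyRange 0 10 1).all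
      (fun i => PySem.List.pyGetD counts.1 i 0 == PySem.List.pyGetD counts.2 i 0)

-- ===== PORT B =====
def equalDigits_alt (n1 : Int) (n2 : Int) : Bool :=
  let d1 := pvDigits n1
  let d2 := pvDigits n2
  PySem.List.sorted d1 (fun x => x) false == PySem.List.sorted d2 (fun x => x) false

-- ===== PRECONDITION & SPEC =====
-- Pre_ excludes exactly the inputs where Python A raises: for a negative n, str(n) starts with
-- '-' and int('-') raises ValueError (B raises identically there).
def Pre_equalDigits (n1 : Int) (n2 : Int) : Prop := 0 ≤ n1 ∧ 0 ≤ n2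
instance (n1 : Int) (n2 : Int) : Decidable (Pre_equalDigits n1 n2) := by
  unfold Pre_equalDigits; infer_instance
def pvWitness_equalDigits : Int × Int := (125, 521)

def Spec_equalDigits (n1 : Int) (n2 : Int) (out : Bool) : Prop := out = equalDigits_alt n1 n2
instance (n1 : Int) (n2 : Int) (out : Bool) : Decidable (Spec_equalDigits n1 n2 out) := by
  unfold Spec_equalDigits; infer_instance

-- ===== CLAIM (what is proved, stated in full; the proofs are below) =====
def Claim_equal_equalDigits : Prop := ∀ (n1 : Int) (n2 : Int), Dom_equalDigits n1 n2 →
  Pre_equalDigits n1 n2 → Spec_equalDigits n1 n2 (equalDigits n1 n2)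

-- ===== LEMMAS AND PROOFS =====

-- the ten decimal digit characters
def pvDigitChars : List Char := ['0','1','2','3','4','5','6','7','8','9']

lemma digitChar_mem (m : Nat) (h : m < 10) : Nat.digitChar m ∈ pvDigitChars := by
  interval_cases m <;> decide

lemma toDigitsCore_mem (f : Nat) : ∀ (n : Nat) (acc : List Char) (c : Char),
    c ∈ Nat.toDigitsCore 10 f n acc → c ∈ acc ∨ c ∈ pvDigitChars := by
  induction f with
  | zero => intro n acc c hc; exact Or.inl hc
  | succ f ih =>
    intro n acc c hc
    simp only [Nat.toDigitsCore] at hc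
    by_cases h : n / 10 = 0
    · rw [if_pos h] at hc
      rcases List.mem_cons.mp hc with h1 | h1
      · exact Or.inr (h1 ▸ digitChar_mem _ (Nat.mod_lt _ (by norm_num)))
      · exact Or.inl h1
    · rw [if_neg h] at hc
      rcases ih _ _ _ hc with h1 | h1
      · rcases List.mem_cons.mp h1 with h2 | h2
        · exact Or.inr (h2 ▸ digitChar_mem _ (Nat.mod_lt _ (by norm_num)))
        · exact Or.inl h2
      · exact Or.inr h1

lemma pvDigitVal_bounds (c : Char) (hc : c ∈ pvDigitChars) :
    0 ≤ pvDigitVal c ∧ pvDigitVal c < 10 := by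
  fin_cases hc <;> decide

lemma pvDigits_bounds (n : Int) (hn : 0 ≤ n) :
    ∀ x ∈ pvDigits n, 0 ≤ x ∧ x < 10 := by
  intro x hx
  simp only [pvDigits, List.mem_map] at hx
  obtain ⟨c, hc, rfl⟩ := hx
  apply pvDigitVal_bounds
  unfold PySem.Int.toChars at hc
  rw [if_neg (by omega)] at hc
  rcases toDigitsCore_mem _ _ _ _ hc with h | h
  · simp at h
  · exact h

lemma length_pvBump (cnt : List Int) (d : Int) : (pvBump cnt d).length = cnt.length := by
  simp [pvBump]

lemma length_foldl_pvBump (l : List Int) (cnt : List Int) :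
    (l.foldl pvBump cnt).length = cnt.length := by
  induction l generalizing cnt with
  | nil => rfl
  | cons x l ih => simp [List.foldl_cons, ih, length_pvBump]

lemma foldl_pvBump_getD (l : List Int) (hb : ∀ x ∈ l, 0 ≤ x ∧ x < 10) :
    ∀ (cnt : List Int), cnt.length = 10 → ∀ (j : Int), 0 ≤ j → j < 10 →
    (l.foldl pvBump cnt).getD j.toNat 0 = cnt.getD j.toNat 0 + l.count j := by
  induction l with
  | nil => intro cnt _ j _ _; simp
  | cons x l ih =>
    intro cnt hlen j hj0 hj
    obtain ⟨hx0, hx10⟩ := hb x (List.mem_cons_self)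
    have hxt : x.toNat < cnt.length := by omega
    have hjt : j.toNat < cnt.length := by omega
    rw [List.foldl_cons,
      ih (fun y hy => hb y (List.mem_cons_of_mem _ hy)) _ (by simp [length_pvBump, hlen]) j hj0 hj]
    by_cases hxy : x = j
    · subst hxy
      have : (pvBump cnt x).getD x.toNat 0 = cnt.getD x.toNat 0 + 1 := by
        rw [pvBump, List.getD_eq_getElem _ _ (by simpa [List.length_set] using hxt)]
        simp [List.getElem_set_self]
      rw [this, List.count_cons_self]
      push_cast
      ring
    · have hne : x.toNat ≠ j.toNat := by omega
      have : (pvBump cnt x).getD j.toNat 0 = cnt.getD j.toNat 0 := by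
        simp [pvBump, List.getD_eq_getElem?_getD, List.getElem?_set_ne hne]
      rw [this, List.count_cons_of_ne hxy]

-- A's whole count phase, characterised: bucket j of count1/count2 holds the digit count
lemma counts_getD (d : List Int) (hb : ∀ x ∈ d, 0 ≤ x ∧ x < 10) (j : Int)
    (hj0 : 0 ≤ j) (hj : j < 10) :
    ((d.foldl pvBump (List.replicate 10 (0 : Int))).getD j.toNat 0) = d.count j := by
  rw [foldl_pvBump_getD d hb _ (by simp) j hj0 hj,
    List.getD_eq_getElem _ _ (by simp; omega), List.getElem_replicate]
  simp

lemma perm_iff_counts (d1 d2 : List Int)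
    (hb1 : ∀ x ∈ d1, 0 ≤ x ∧ x < 10) (hb2 : ∀ x ∈ d2, 0 ≤ x ∧ x < 10) :
    d1.Perm d2 ↔ (∀ j : Int, 0 ≤ j → j < 10 → d1.count j = d2.count j) := by
  constructor
  · intro hp j _ _; exact hp.count_eq j
  · intro h
    refine List.perm_iff_count.mpr fun a => ?_
    by_cases ha : 0 ≤ a ∧ a < 10
    · exact h a ha.1 ha.2
    · rw [List.count_eq_zero.mpr (fun hm => ha (hb1 a hm)),
        List.count_eq_zero.mpr (fun hm => ha (hb2 a hm))]

-- ===== VERDICT (by name: the statement is the Claim_ definition above) =====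
theorem equalDigits_spec : Claim_equal_equalDigits := by
  intro n1 n2 _ hpre
  unfold Spec_equalDigits equalDigits equalDigits_alt
  have hb1 := pvDigits_bounds n1 hpre.1
  have hb2 := pvDigits_bounds n2 hpre.2
  set d1 := pvDigits n1 with hd1
  set d2 := pvDigits n2 with hd2
  rw [Bool.eq_iff_iff]
  simp only [beq_iff_eq, PySem.List.sorted_id_eq_sorted_id_iff_perm]
  by_cases hlen : d1.length = d2.length
  · rw [if_neg (by omega)]
    have hpair : List.foldl
        (fun (s : List Int × List Int) i =>
          (pvBump s.1 (PySem.List.pyGetD d1 i 0), pvBump s.2 (PySem.List.pyGetD d2 i 0)))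
        (List.replicate 10 (0:Int), List.replicate 10 (0:Int))
        (PySem.List.pyRange 0 (d1.length : Int) 1)
        = (d1.foldl pvBump (List.replicate 10 (0:Int)), d2.foldl pvBump (List.replicate 10 (0:Int))) := by
      have hp := PySem.List.foldl_prod_mk
        (fun (a : List Int) (i : Int) => pvBump a (PySem.List.pyGetD d1 i 0))
        (fun (a : List Int) (i : Int) => pvBump a (PySem.List.pyGetD d2 i 0))
        (PySem.List.pyRange 0 (d1.length : Int) 1)
        (List.replicate 10 (0:Int)) (List.replicate 10 (0:Int))
      rw [hp, PySem.List.foldl_pyRange_zero_pyGetD' d1 0 pvBump (List.replicate 10 (0:Int)),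
        hlen, PySem.List.foldl_pyRange_zero_pyGetD' d2 0 pvBump (List.replicate 10 (0:Int))]
    simp only [hpair]
    have hc1 : (d1.foldl pvBump (List.replicate 10 (0:Int))).length = 10 := by
      simp [length_foldl_pvBump]
    have hc2 : (d2.foldl pvBump (List.replicate 10 (0:Int))).length = 10 := by
      simp [length_foldl_pvBump]
    rw [List.all_eq_true, perm_iff_counts d1 d2 hb1 hb2]
    constructor
    · intro h j hj0 hj
      have h' := h j (PySem.List.mem_pyRange_one.mpr ⟨hj0, hj⟩)
      rw [beq_iff_eq, PySem.List.pyGetD_eq_getElem _ 0 hj0 (by rw [hc1]; omega),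
        PySem.List.pyGetD_eq_getElem _ 0 hj0 (by rw [hc2]; omega),
        ← List.getD_eq_getElem _ _ (by rw [hc1]; omega),
        ← List.getD_eq_getElem _ _ (by rw [hc2]; omega),
        counts_getD d1 hb1 j hj0 hj, counts_getD d2 hb2 j hj0 hj] at h'
      exact_mod_cast h'
    · intro h j hjm
      obtain ⟨hj0, hj⟩ := PySem.List.mem_pyRange_one.mp hjm
      rw [beq_iff_eq, PySem.List.pyGetD_eq_getElem _ 0 hj0 (by rw [hc1]; omega),
        PySem.List.pyGetD_eq_getElem _ 0 hj0 (by rw [hc2]; omega),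
        ← List.getD_eq_getElem _ _ (by rw [hc1]; omega),
        ← List.getD_eq_getElem _ _ (by rw [hc2]; omega),
        counts_getD d1 hb1 j hj0 hj, counts_getD d2 hb2 j hj0 hj]
      exact_mod_cast h j hj0 hj
  · rw [if_pos (by omega)]
    exact ⟨fun h => by simp at h, fun hp => absurd hp.length_eq hlen⟩
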